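-- pv_equiv track=rewrite | github.com/Elmontag/imap_smart_sorter | backend/classifier.py | _summarize_hierarchy
-- ===== SOURCE A (Python) =====
-- from collections import defaultdict
-- from typing import Any, Dict, Iterable, List, Sequence, Tuple
--
-- def _summarize_hierarchy(folders: Sequence[str]) -> str:
--     groups: Dict[str, List[str]] = defaultdict(list)
--     for raw in folders:
--         if not isinstance(raw, str):
--             continue
--         parts = [part.strip() for part in raw.split("/") if part.strip()]
--         if not parts:
--             continue
--         head = parts[0]
--         tail = "/".join(parts[1:]) if len(parts) > 1 else ""
--         if tail:
--             groups[head].append(tail)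
--         else:
--             groups.setdefault(head, [])
--     if not groups:
--         return "Keine Ordnerstruktur vorhanden."
--     lines: List[str] = []
--     for head in sorted(groups):
--         children = sorted({child for child in groups[head] if child})
--         if children:
--             snippet = ", ".join(children[:5])
--             lines.append(f"- {head}: {snippet}")
--         else:
--             lines.append(f"- {head}")
--     return "\n".join(lines)
-- ===== SOURCE B (Python) =====
-- from itertools import groupby
--
--
-- def _summarize_hierarchy(folders):
--     pairs = []
--     for raw in folders:
--         if not isinstance(raw, str):
--             continue
--         parts = [part.strip() for part in raw.split("/") if part.strip()]
--         if parts: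
--             pairs.append((parts[0], "/".join(parts[1:]) if len(parts) > 1 else ""))
--     if not pairs:
--         return "Keine Ordnerstruktur vorhanden."
--     pairs.sort(key=lambda p: p[0])
--     lines = []
--     for head, grp in groupby(pairs, key=lambda p: p[0]):
--         children = sorted({tail for _, tail in grp if tail})
--         if children:
--             lines.append(f"- {head}: {', '.join(children[:5])}")
--         else:
--             lines.append(f"- {head}")
--     return "\n".join(lines)
-- ===== Notes on version B (the rewrite author's own statement) =====
-- stated objective: alternative
-- what changed: B replaces A's defaultdict-of-lists grouping followed by a sort of the keys with a flat (head, tail) pair list that is sorted by head once and then swept in a single itertools.groupby pass emitting one line per consecutive run.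
import Mathlib
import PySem

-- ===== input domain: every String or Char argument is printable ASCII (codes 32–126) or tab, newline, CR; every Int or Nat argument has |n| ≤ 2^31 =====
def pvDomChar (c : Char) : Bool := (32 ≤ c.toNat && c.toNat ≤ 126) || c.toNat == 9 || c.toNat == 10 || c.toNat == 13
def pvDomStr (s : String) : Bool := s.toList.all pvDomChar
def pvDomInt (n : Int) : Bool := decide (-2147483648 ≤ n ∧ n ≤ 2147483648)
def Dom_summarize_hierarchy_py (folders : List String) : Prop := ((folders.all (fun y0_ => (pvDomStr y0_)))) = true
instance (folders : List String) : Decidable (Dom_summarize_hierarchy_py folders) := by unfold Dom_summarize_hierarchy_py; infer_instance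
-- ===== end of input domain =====

-- B replaces A's dict-of-lists grouping followed by a key sort with a flat (head, tail)
-- pair list sorted by head and folded into consecutive runs (itertools.groupby);
-- objective: alternative decomposition, same output.

-- ===== PORT A =====
-- literal port of the per-entry parsing both Pythons perform on each `raw`
-- (split? is `some` here since the separator "/" is nonempty)
def pvParse (raw : String) : Option (String × String) :=
  let parts := (((PySem.Str.split? raw "/").getD []).map PySem.Str.strip).filter (fun p => p != "")
  match parts with
  | [] => none
  | head :: rest =>
      some (head, if (head :: rest).length > 1 then PySem.Str.join "/" rest else "")

def summarize_hierarchy_py (folders : List String) : String :=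
  let groups : PySem.Dict String (List String) :=
    folders.foldl (fun g raw =>
      match pvParse raw with
      | none => g
      | some (head, tail) =>
        if tail != "" then g.modify head [] (fun l => l ++ [tail])
        else g.setdefault head []) PySem.Dict.empty
  if groups.items = [] then "Keine Ordnerstruktur vorhanden."
  else
    let lines : List String :=
      (PySem.List.sorted groups.keys (fun x => x) false).map (fun head =>
        let children := PySem.List.sorted
          (PySem.Set.ofList ((groups.getD head []).filter (fun c => c != "")))
          (fun x => x) false
        if children ≠ [] then
          PySem.Str.join "" ["- ", head, ": ", PySem.Str.join ", " (children.take 5)]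
        else PySem.Str.join "" ["- ", head])
    PySem.Str.join "\n" lines

-- ===== PORT B =====
-- itertools.groupby on the head-sorted pair list: consecutive runs of equal heads
def pvGroupRuns : List (String × String) → List (String × List String)
  | [] => []
  | (h, t) :: rest =>
      (h, t :: (rest.takeWhile (fun p => p.1 == h)).map Prod.snd) ::
      pvGroupRuns (rest.dropWhile (fun p => p.1 == h))
  termination_by qs => qs.length
  decreasing_by
    simp only [List.length_cons]
    exact Nat.lt_succ_of_le (List.length_dropWhile_le _ _)

def summarize_hierarchy_py_alt (folders : List String) : String :=
  let pairs : List (String × String) :=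
    folders.foldl (fun acc raw =>
      match pvParse raw with
      | none => acc
      | some p => acc ++ [p]) []
  if pairs = [] then "Keine Ordnerstruktur vorhanden."
  else
    let qs := PySem.List.sorted pairs (fun p => p.1) false
    let lines : List String :=
      (pvGroupRuns qs).map (fun g =>
        let children := PySem.List.sorted
          (PySem.Set.ofList (g.2.filter (fun t => t != "")))
          (fun x => x) false
        if children ≠ [] then
          PySem.Str.join "" ["- ", g.1, ": ", PySem.Str.join ", " (children.take 5)]
        else PySem.Str.join "" ["- ", g.1])
    PySem.Str.join "\n" lines

-- ===== PRECONDITION & SPEC =====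
def Spec_summarize_hierarchy_py (folders : List String) (out : String) : Prop := out = summarize_hierarchy_py_alt folders
instance (folders : List String) (out : String) : Decidable (Spec_summarize_hierarchy_py folders out) := by unfold Spec_summarize_hierarchy_py; infer_instance

-- ===== CLAIM (what is proved, stated in full; the proofs are below) =====
def Claim_equal_summarize_hierarchy_py : Prop := ∀ (folders : List String), Dom_summarize_hierarchy_py folders → Spec_summarize_hierarchy_py folders (summarize_hierarchy_py folders)

-- ===== LEMMAS AND PROOFS =====

-- the step function of A's grouping loop, on one parsed (head, tail) pair
def pvStepA (g : PySem.Dict String (List String)) (p : String × String) :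
    PySem.Dict String (List String) :=
  if p.2 != "" then g.modify p.1 [] (fun l => l ++ [p.2]) else g.setdefault p.1 []

-- A's fold over the raw folder list is the fold of pvStepA over the parsed pairs
theorem pvA_fold (l : List String) (g : PySem.Dict String (List String)) :
    l.foldl (fun g raw =>
      match pvParse raw with
      | none => g
      | some (head, tail) =>
        if tail != "" then g.modify head [] (fun l => l ++ [tail])
        else g.setdefault head []) g
    = (l.filterMap pvParse).foldl pvStepA g := by
  induction l generalizing g with
  | nil => rfl
  | cons r l ih =>
    simp only [List.foldl_cons, List.filterMap_cons]
    cases hp : pvParse r with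
    | none => exact ih g
    | some p => rw [List.foldl_cons]; exact ih _

-- B's pair-collecting loop produces exactly the parsed pairs
theorem pvB_fold (l : List String) (acc : List (String × String)) :
    l.foldl (fun acc raw =>
      match pvParse raw with
      | none => acc
      | some p => acc ++ [p]) acc
    = acc ++ l.filterMap pvParse := by
  induction l generalizing acc with
  | nil => simp
  | cons r l ih =>
    simp only [List.foldl_cons, List.filterMap_cons]
    cases hp : pvParse r with
    | none => exact ih acc
    | some p => have := ih (acc ++ [p]); simpa using this

theorem pvKeysInsert (d : PySem.Dict String (List String)) (k : String) (v : List String) :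
    (d.insert k v).keys = PySem.Set.add d.keys k := by
  by_cases h : k ∈ d.keys
  · have hc : d.contains k = true := by
      rw [PySem.Dict.contains_eq_decide_mem_keys]; simpa using h
    have hs : PySem.Set.contains d.keys k = true := by
      simp [PySem.Set.contains]; exact h
    simp only [PySem.Dict.insert, PySem.Set.add, hc, hs, if_pos]
    simp only [PySem.Dict.keys, List.map_map]
    exact List.map_congr_left (fun (p : String × List String) _ => by
      by_cases hp : p.1 = k <;> simp [hp])
  · have hc : d.contains k = false := by
      rw [PySem.Dict.contains_eq_decide_mem_keys]; simpa using h
    have hs : PySem.Set.contains d.keys k = false := by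
      simp [PySem.Set.contains]; exact h
    simp only [PySem.Dict.insert, PySem.Set.add, hc, hs, if_neg, Bool.false_eq_true,
      not_false_iff]
    simp [PySem.Dict.keys]

theorem pvKeysStep (d : PySem.Dict String (List String)) (p : String × String) :
    (pvStepA d p).keys = PySem.Set.add d.keys p.1 := by
  unfold pvStepA
  split
  · rw [PySem.Dict.keys_modify, pvKeysInsert]
  · rw [PySem.Dict.keys_setdefault]
    by_cases h : p.1 ∈ d.keys
    · have hc : d.contains p.1 = true := by
        rw [PySem.Dict.contains_eq_decide_mem_keys]; simpa using h
      simp [hc, PySem.Set.add, h]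
    · have hc : d.contains p.1 = false := by
        rw [PySem.Dict.contains_eq_decide_mem_keys]; simpa using h
      simp [hc, PySem.Set.add, h]

theorem pvKeysFold (ps : List (String × String)) (d : PySem.Dict String (List String)) :
    (ps.foldl pvStepA d).keys = PySem.Set.update d.keys (ps.map Prod.fst) := by
  induction ps generalizing d with
  | nil => rfl
  | cons p ps ih =>
    simp only [List.foldl_cons, List.map_cons, PySem.Set.update, List.foldl_cons]
    rw [ih, ← pvKeysStep d p]
    rfl

theorem pvGetDFold (ps : List (String × String)) (d : PySem.Dict String (List String))
    (h : String) :
    (ps.foldl pvStepA d).getD h [] =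
      d.getD h [] ++ ((ps.filter (fun p => p.1 == h)).map Prod.snd).filter (fun t => t != "") := by
  induction ps generalizing d with
  | nil => simp
  | cons p ps ih =>
    obtain ⟨a, b⟩ := p
    simp only [List.foldl_cons, List.filter_cons]
    rw [ih]
    unfold pvStepA
    by_cases ht : b != ""
    · rw [if_pos ht, PySem.Dict.getD_modify]
      by_cases hh : h = a
      · subst hh
        simp [ht, List.append_assoc]
      · have hne : ¬ ((a == h) = true) := by simpa using Ne.symm hh
        simp [hh, hne]
    · rw [if_neg ht]
      have hset : (d.setdefault a []).getD h [] = d.getD h [] := by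
        by_cases hh : h = a
        · subst hh; exact PySem.Dict.getD_setdefault_self d h [] []
        · simp only [PySem.Dict.getD, PySem.Dict.get?_setdefault_of_ne d [] hh]
      rw [hset]
      by_cases hh : (a == h) = true
      · have ht' : ¬ ((b != "") = true) := ht
        simp [hh, ht']
      · simp [hh]

-- first element surviving dropWhile fails the predicate
theorem pvHeadDropWhile {α : Type} (p : α → Bool) (l : List α) (x : α) (xs : List α)
    (h : l.dropWhile p = x :: xs) : p x = false := by
  induction l with
  | nil => simp [List.dropWhile] at h
  | cons a t ih =>
    rw [List.dropWhile_cons] at h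
    split at h
    · exact ih h
    · next hp => cases h; simpa using hp

-- sorted(set(xs)) only depends on xs up to permutation
theorem pvSortedSetPerm (xs ys : List String) (hp : xs.Perm ys) :
    PySem.List.sorted (PySem.Set.ofList xs) (fun x => x) false
      = PySem.List.sorted (PySem.Set.ofList ys) (fun x => x) false := by
  apply PySem.List.sorted_eq_of_perm_of_pairwise_lt
  · refine ((PySem.List.sorted_perm _ _ _).trans ?_)
    rw [List.perm_ext_iff_of_nodup (PySem.Set.nodup_ofList ys) (PySem.Set.nodup_ofList xs)]
    intro a
    rw [PySem.Set.mem_ofList, PySem.Set.mem_ofList]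
    exact (hp.mem_iff).symm
  · exact PySem.List.sorted_ofList_pairwise_lt ys

-- characterisation of the runs of a head-sorted pair list
theorem pvGroupRuns_spec (qs : List (String × String))
    (hp : qs.Pairwise (fun a b => a.1 ≤ b.1)) :
    (∀ g ∈ pvGroupRuns qs, g.2 = (qs.filter (fun p => p.1 == g.1)).map Prod.snd) ∧
    ((pvGroupRuns qs).map Prod.fst).Pairwise (· < ·) ∧
    (∀ x, x ∈ (pvGroupRuns qs).map Prod.fst ↔ x ∈ qs.map Prod.fst) := by
  match qs with
  | [] => simp [pvGroupRuns]
  | (h, t) :: rest =>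
    rw [List.pairwise_cons] at hp
    obtain ⟨hle, hpr⟩ := hp
    have hdr_pair : (rest.dropWhile (fun p => p.1 == h)).Pairwise (fun a b => a.1 ≤ b.1) :=
      hpr.sublist (List.dropWhile_sublist _)
    have ih := pvGroupRuns_spec (rest.dropWhile (fun p => p.1 == h)) hdr_pair
    obtain ⟨ih1, ih2, ih3⟩ := ih
    have htk : ∀ p ∈ rest.takeWhile (fun p => p.1 == h), p.1 = h := by
      intro p hpmem
      have := List.mem_takeWhile_imp hpmem
      simpa using this
    have hdr_lt : ∀ p ∈ rest.dropWhile (fun p => p.1 == h), h < p.1 := by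
      cases hdw : rest.dropWhile (fun p => p.1 == h) with
      | nil => simp
      | cons q dr' =>
        have hq_ne : ¬ (q.1 = h) := by
          have := pvHeadDropWhile _ rest q dr' hdw
          simpa using this
        have hq_mem : q ∈ rest := (List.dropWhile_sublist _).subset (by rw [hdw]; simp)
        have hq_lt : h < q.1 := lt_of_le_of_ne (hle q hq_mem) (fun he => hq_ne he.symm)
        intro p hpmem
        rw [List.mem_cons] at hpmem
        rcases hpmem with rfl | hpmem
        · exact hq_lt
        · have hq_pair := hdr_pair
          rw [hdw, List.pairwise_cons] at hq_pair
          exact lt_of_lt_of_le hq_lt (hq_pair.1 p hpmem)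
    have hsplit : rest.takeWhile (fun p => p.1 == h) ++ rest.dropWhile (fun p => p.1 == h) = rest :=
      List.takeWhile_append_dropWhile
    have hfilter_tk : (rest.takeWhile (fun p => p.1 == h)).filter (fun p => p.1 == h)
        = rest.takeWhile (fun p => p.1 == h) :=
      List.filter_eq_self.mpr (fun p hm => by simp [htk p hm])
    have hfilter_dr : (rest.dropWhile (fun p => p.1 == h)).filter (fun p => p.1 == h) = [] :=
      List.filter_eq_nil_iff.mpr (fun p hm => by simp [ne_of_gt (hdr_lt p hm)])
    refine ⟨?_, ?_, ?_⟩
    · intro g hg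
      rw [pvGroupRuns, List.mem_cons] at hg
      rcases hg with rfl | hg
      · simp only [List.filter_cons]
        have : ((h, t).1 == h) = true := by simp
        rw [← hsplit, List.filter_append, hfilter_tk, hfilter_dr]
        simp
      · have hg1 : g.1 ∈ (rest.dropWhile (fun p => p.1 == h)).map Prod.fst := by
          rw [← ih3]; exact List.mem_map.mpr ⟨g, hg, rfl⟩
        obtain ⟨q, hq_mem, hq_eq⟩ := List.mem_map.mp hg1
        have hlt : h < g.1 := hq_eq ▸ hdr_lt q hq_mem
        rw [ih1 g hg]
        congr 1
        rw [← hsplit, List.filter_cons, List.filter_append]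
        have h1 : ¬ ((h, t).1 == g.1) = true := by simp [ne_of_lt hlt]
        have h2 : (rest.takeWhile (fun p => p.1 == h)).filter (fun p => p.1 == g.1) = [] :=
          List.filter_eq_nil_iff.mpr
            (fun p hm => by simp [htk p hm, ne_of_lt hlt])
        simp [h1, h2]
    · rw [pvGroupRuns]
      simp only [List.map_cons, List.pairwise_cons]
      refine ⟨?_, ih2⟩
      intro x hx
      obtain ⟨g, hg, rfl⟩ := List.mem_map.mp hx
      have hg1 : g.1 ∈ (rest.dropWhile (fun p => p.1 == h)).map Prod.fst :=
        (ih3 g.1).mp (List.mem_map.mpr ⟨g, hg, rfl⟩)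
      obtain ⟨q, hq_mem, hq_eq⟩ := List.mem_map.mp hg1
      exact hq_eq ▸ hdr_lt q hq_mem
    · intro x
      rw [pvGroupRuns]
      simp only [List.map_cons, List.mem_cons]
      rw [ih3 x]
      constructor
      · rintro (rfl | hx)
        · exact Or.inl rfl
        · obtain ⟨q, hq_mem, hq_eq⟩ := List.mem_map.mp hx
          exact Or.inr (List.mem_map.mpr ⟨q, (List.dropWhile_sublist _).subset hq_mem, hq_eq⟩)
      · rintro (rfl | hx)
        · exact Or.inl rfl
        · obtain ⟨q, hq_mem, hq_eq⟩ := List.mem_map.mp hx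
          rw [← hsplit, List.mem_append] at hq_mem
          rcases hq_mem with hq_tk | hq_dr
          · exact Or.inl (by rw [← hq_eq, htk q hq_tk])
          · exact Or.inr (List.mem_map.mpr ⟨q, hq_dr, hq_eq⟩)
  termination_by qs.length
  decreasing_by
    simp only [List.length_cons]
    exact Nat.lt_succ_of_le (List.length_dropWhile_le _ _)

theorem summarize_hierarchy_py_spec_aux (folders : List String) :
    summarize_hierarchy_py folders = summarize_hierarchy_py_alt folders := by
  unfold summarize_hierarchy_py summarize_hierarchy_py_alt
  rw [pvA_fold, pvB_fold]
  simp only [List.nil_append]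
  set ps := folders.filterMap pvParse with hps
  have hkeys : (ps.foldl pvStepA PySem.Dict.empty).keys = PySem.Set.ofList (ps.map Prod.fst) := by
    rw [pvKeysFold, ← PySem.Set.update_empty]
    rfl
  by_cases hemp : ps = []
  · rw [hemp]
    have h1 : (PySem.Dict.empty : PySem.Dict String (List String)).items = [] := rfl
    simp [h1]
  · have hitems : ¬ ((ps.foldl pvStepA PySem.Dict.empty).items = []) := by
      intro hit
      have : (ps.foldl pvStepA PySem.Dict.empty).keys = [] := by
        simp [PySem.Dict.keys, hit]
      rw [hkeys] at this
      obtain ⟨p, hp⟩ := List.exists_mem_of_ne_nil ps hemp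
      have : p.1 ∈ ([] : List String) := by
        rw [← this, PySem.Set.mem_ofList]
        exact List.mem_map.mpr ⟨p, hp, rfl⟩
      simp at this
    rw [if_neg hitems, if_neg hemp]
    congr 1
    -- the two `lines` lists coincide
    set qs := PySem.List.sorted ps (fun p => p.1) false with hqs
    have hqperm : qs.Perm ps := PySem.List.sorted_perm ps (fun p => p.1) false
    have hqpair : qs.Pairwise (fun a b => a.1 ≤ b.1) := PySem.List.sorted_pairwise ps (fun p => p.1)
    obtain ⟨hg1, hg2, hg3⟩ := pvGroupRuns_spec qs hqpair
    have hheads : PySem.List.sorted (ps.foldl pvStepA PySem.Dict.empty).keys (fun x => x) false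
        = (pvGroupRuns qs).map Prod.fst := by
      rw [hkeys]
      apply PySem.List.sorted_eq_of_perm_of_pairwise_lt
      · rw [List.perm_ext_iff_of_nodup (hg2.imp fun h => ne_of_lt h)
            (PySem.Set.nodup_ofList _)]
        intro a
        rw [PySem.Set.mem_ofList, hg3]
        exact ⟨fun hx => (hqperm.map Prod.fst).mem_iff.mp hx,
               fun hx => (hqperm.map Prod.fst).mem_iff.mpr hx⟩
      · exact hg2
    rw [hheads, List.map_map]
    apply List.map_congr_left
    intro g hg
    simp only [Function.comp_apply]
    have hchild : PySem.List.sorted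
        (PySem.Set.ofList (((ps.foldl pvStepA PySem.Dict.empty).getD g.1 []).filter (fun c => c != "")))
        (fun x => x) false
        = PySem.List.sorted (PySem.Set.ofList (g.2.filter (fun t => t != ""))) (fun x => x) false := by
      rw [pvGetDFold, hg1 g hg]
      have hid : (((ps.filter (fun p => p.1 == g.1)).map Prod.snd).filter
          (fun t => t != "")).filter (fun c => c != "")
          = ((ps.filter (fun p => p.1 == g.1)).map Prod.snd).filter (fun t => t != "") :=
        List.filter_eq_self.mpr (fun a ha => (List.mem_filter.mp ha).2)
      rw [show (PySem.Dict.empty : PySem.Dict String (List String)).getD g.1 [] = [] from rfl,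
        List.nil_append, hid]
      exact pvSortedSetPerm _ _ (((hqperm.symm.filter _).map Prod.snd).filter _)
    rw [hchild]

-- ===== VERDICT (by name: the statement is the Claim_ definition above) =====
theorem summarize_hierarchy_py_spec : Claim_equal_summarize_hierarchy_py := by
  intro folders _
  exact summarize_hierarchy_py_spec_aux folders
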